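-- pv_equiv track=rewrite | github.com/gabipeschke/projeto_criptografia | criptografia.py | checkValidKey
-- ===== SOURCE A (Python) =====
-- LETTERS_ALLOWED = 'ABCDEFGHIJKLMNOPQRSTUVWXYZ'
--
-- def checkValidKey(key):
--     keyLegth = 26
--
--     if len(key) != keyLegth:
--         return False
--
--     charArrayKey = list(key.upper())
--
--     charArrayKeySorted = sorted(charArrayKey)
--
--     stringKeySorted = ""
--
--     for char in charArrayKeySorted:
--         stringKeySorted += char
--
--     if not stringKeySorted.__eq__(LETTERS_ALLOWED):
--         return False
--
--     return True
-- ===== SOURCE B (Python) =====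
-- LETTERS_ALLOWED = 'ABCDEFGHIJKLMNOPQRSTUVWXYZ'
--
-- def checkValidKey(key):
--     if len(key) != 26:
--         return False
--     return set(key.upper()) == set(LETTERS_ALLOWED)
-- ===== Notes on version B (the rewrite author's own statement) =====
-- stated objective: idiomatic
-- what changed: Replaces the sort-then-rebuild-a-string-and-compare pipeline by a one-pass hash-set membership comparison: set(key.upper()) == set(LETTERS_ALLOWED), which with the length-26 guard is equivalent to being a permutation of the alphabet.
import Mathlib
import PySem

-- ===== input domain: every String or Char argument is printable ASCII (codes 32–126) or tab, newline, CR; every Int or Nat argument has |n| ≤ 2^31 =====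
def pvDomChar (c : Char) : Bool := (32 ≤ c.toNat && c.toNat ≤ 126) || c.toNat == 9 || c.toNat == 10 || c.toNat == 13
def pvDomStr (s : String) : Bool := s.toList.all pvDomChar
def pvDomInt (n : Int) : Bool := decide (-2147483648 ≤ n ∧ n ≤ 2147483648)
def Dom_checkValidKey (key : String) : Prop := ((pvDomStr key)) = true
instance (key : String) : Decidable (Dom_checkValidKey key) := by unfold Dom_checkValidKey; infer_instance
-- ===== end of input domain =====

-- B replaces A's sort-and-rebuild-a-string comparison by a one-pass set comparison (idiomatic; same cost class in practice).

def lettersAllowed : String := "ABCDEFGHIJKLMNOPQRSTUVWXYZ"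

-- ===== PORT A =====
def checkValidKey (key : String) : Bool :=
  let keyLegth : Int := 26
  if PySem.Str.len key ≠ keyLegth then false
  else
    let charArrayKey : List Char := (PySem.Str.upper key).toList
    let charArrayKeySorted := PySem.List.sorted charArrayKey (fun c => c) false
    let stringKeySorted := charArrayKeySorted.foldl (fun s c => s.push c) ""
    if ¬ (stringKeySorted == lettersAllowed) then false
    else true

-- ===== PORT B =====
def checkValidKey_alt (key : String) : Bool :=
  if PySem.Str.len key ≠ 26 then false
  else PySem.Set.equal (PySem.Set.ofList (PySem.Str.upper key).toList)
                       (PySem.Set.ofList lettersAllowed.toList)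

-- ===== PRECONDITION & SPEC =====
def Spec_checkValidKey (key : String) (out : Bool) : Prop := out = checkValidKey_alt key
instance (key : String) (out : Bool) : Decidable (Spec_checkValidKey key out) := by unfold Spec_checkValidKey; infer_instance

-- ===== CLAIM (what is proved, stated in full; the proofs are below) =====
def Claim_equal_checkValidKey : Prop := ∀ (key : String), Dom_checkValidKey key → Spec_checkValidKey key (checkValidKey key)

-- ===== LEMMAS AND PROOFS =====

theorem foldl_push_toList (l : List Char) (s : String) :
    (l.foldl (fun s c => s.push c) s).toList = s.toList ++ l := by
  induction l generalizing s with
  | nil => simp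
  | cons c t ih => simp [List.foldl, ih]

theorem perm_iff_same_mem (l : List Char) (hl : l.length = 26) :
    l.Perm lettersAllowed.toList ↔ (∀ x, x ∈ l ↔ x ∈ lettersAllowed.toList) := by
  constructor
  · intro hp x
    exact ⟨fun h => hp.mem_iff.mp h, fun h => hp.mem_iff.mpr h⟩
  · intro hmem
    have hLn : lettersAllowed.toList.Nodup := by decide
    have hfs : l.toFinset = lettersAllowed.toList.toFinset := by
      ext x; simp only [List.mem_toFinset]; exact hmem x
    have hcard : l.toFinset.card = l.length := by
      rw [hfs, List.toFinset_card_of_nodup hLn, hl]; decide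
    have hnd : l.Nodup := by
      have := Multiset.toFinset_card_eq_card_iff_nodup (m := (l : Multiset Char))
      simpa using this.mp (by simpa using hcard)
    exact (List.perm_ext_iff_of_nodup hnd hLn).mpr hmem

theorem core_eq (u : List Char) (hulen : u.length = 26) :
    (if List.foldl (fun s c => s.push c) "" (PySem.List.sorted u (fun c => c)) = lettersAllowed
      then true else false)
      = PySem.Set.equal (PySem.Set.ofList u) (PySem.Set.ofList lettersAllowed.toList) := by
  by_cases hperm : u.Perm lettersAllowed.toList
  · have hsorted : PySem.List.sorted u (fun c => c) false = lettersAllowed.toList :=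
      PySem.List.sorted_eq_of_perm_of_pairwise_lt _ _ _ hperm.symm (by decide)
    have hA : List.foldl (fun s c => s.push c) "" (PySem.List.sorted u (fun c => c)) = lettersAllowed := by
      apply String.ext
      rw [foldl_push_toList, hsorted]
      simp [String.toList]
    have hB : PySem.Set.equal (PySem.Set.ofList u) (PySem.Set.ofList lettersAllowed.toList) = true := by
      rw [PySem.Set.equal_iff]
      intro x
      simp only [PySem.Set.mem_ofList]
      exact ((perm_iff_same_mem u hulen).mp hperm) x
    rw [hB]; simp [hA]
  · have hsorted : PySem.List.sorted u (fun c => c) false ≠ lettersAllowed.toList := by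
      intro h
      exact hperm ((h ▸ (PySem.List.sorted_perm u (fun c => c) false)).symm)
    have hA : List.foldl (fun s c => s.push c) "" (PySem.List.sorted u (fun c => c)) ≠ lettersAllowed := by
      intro h
      apply hsorted
      have := congrArg String.toList h
      rwa [foldl_push_toList] at this
    have hB : PySem.Set.equal (PySem.Set.ofList u) (PySem.Set.ofList lettersAllowed.toList) = false := by
      apply Bool.eq_false_iff.mpr
      intro h
      apply hperm
      apply (perm_iff_same_mem u hulen).mpr
      intro x
      have := (PySem.Set.equal_iff _ _).mp h x
      simpa only [PySem.Set.mem_ofList] using this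
    rw [hB]; simp [hA]

-- ===== VERDICT =====
theorem checkValidKey_spec : Claim_equal_checkValidKey := by
  intro key _
  unfold Spec_checkValidKey checkValidKey checkValidKey_alt
  simp only [PySem.Str.len_eq, PySem.Str.toList_upper, ne_eq, ite_not, beq_iff_eq]
  by_cases hk : key.length = 26
  · have hulen : (PySem.Chars.upper key.toList).length = 26 := by
      simp [PySem.Chars.upper, hk]
    have hki : ((key.toList.length : Int)) = 26 := by
      rw [String.length_toList]; exact_mod_cast hk
    rw [if_pos hki, if_pos hki]
    exact core_eq (PySem.Chars.upper key.toList) hulen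
  · have hki : ¬ ((key.toList.length : Int) = 26) := by
      rw [String.length_toList]; intro h; exact hk (by exact_mod_cast h)
    rw [if_neg hki, if_neg hki]
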